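-- pv_equiv track=rewrite | github.com/limitedeternity/ROPEmporium | badchars/x32/xor_valid.py | valid_xor
-- ===== SOURCE A (Python) =====
-- def valid_xor(string, xor_value):
--     output = ''
--     badchars = 'xga.'
--     for char in string:
--         output += chr(ord(char) ^ xor_value)
--     for char in badchars:
--         if char in output:
--             return False
--     return True
-- ===== SOURCE B (Python) =====
-- def valid_xor(string, xor_value):
--     badchars = {'x', 'g', 'a', '.'}
--     for char in string:
--         if chr(ord(char) ^ xor_value) in badchars:
--             return False
--     return True
-- ===== Notes on version B (the rewrite author's own statement) =====
-- stated objective: simpler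
-- what changed: B replaces A's build-the-whole-XORed-output-string-then-scan-it-once-per-badchar structure with a single fused pass over the input that tests each XORed char against a badchar set and returns False at the first hit, never materialising the output.
import Mathlib
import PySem

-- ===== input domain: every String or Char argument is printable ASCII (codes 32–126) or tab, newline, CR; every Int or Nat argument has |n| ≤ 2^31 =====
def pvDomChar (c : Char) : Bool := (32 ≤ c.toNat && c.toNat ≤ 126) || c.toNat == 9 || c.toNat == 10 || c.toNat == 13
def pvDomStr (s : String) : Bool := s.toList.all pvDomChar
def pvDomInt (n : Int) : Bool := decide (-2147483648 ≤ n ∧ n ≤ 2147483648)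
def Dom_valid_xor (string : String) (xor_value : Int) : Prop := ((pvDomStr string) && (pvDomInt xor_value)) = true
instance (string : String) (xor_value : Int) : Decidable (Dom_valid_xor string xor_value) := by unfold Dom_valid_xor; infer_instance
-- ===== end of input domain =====

-- B fuses A's build-output-then-four-scans into one early-exit pass over the input (objective: simpler).
-- ===== PORT A =====
-- A builds the XORed output (a list of character codes) by repeated appending, then
-- scans it once per badchar ('x','g','a','.' = codes 120,103,97,46), in that order.
def valid_xor (string : String) (xor_value : Int) : Bool :=
  let output : List Int :=
    string.toList.foldl (fun acc char => acc ++ [PySem.Int.bxor (char.toNat : Int) xor_value]) []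
  if (120 : Int) ∈ output then false
  else if (103 : Int) ∈ output then false
  else if (97 : Int) ∈ output then false
  else if (46 : Int) ∈ output then false
  else true

-- ===== PORT B =====
-- B: single pass with early exit; the badchar-set membership test on the XORed code.
def validXorGo (xs : List Char) (xor_value : Int) : Bool :=
  match xs with
  | [] => true
  | char :: rest =>
    let xc := PySem.Int.bxor (char.toNat : Int) xor_value
    if xc == 120 || xc == 103 || xc == 97 || xc == 46 then false
    else validXorGo rest xor_value

def valid_xor_alt (string : String) (xor_value : Int) : Bool :=
  validXorGo string.toList xor_value

-- ===== PRECONDITION & SPEC =====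
-- Pre_ excludes exactly the inputs where Python's chr raises ValueError (the XORed code of
-- some character is negative or above 0x10FFFF, e.g. any negative xor_value on a nonempty string).
def Pre_valid_xor (string : String) (xor_value : Int) : Prop :=
  (string.toList.all fun c =>
    decide (0 ≤ PySem.Int.bxor (c.toNat : Int) xor_value ∧
            PySem.Int.bxor (c.toNat : Int) xor_value ≤ 1114111)) = true
instance (string : String) (xor_value : Int) : Decidable (Pre_valid_xor string xor_value) := by
  unfold Pre_valid_xor; infer_instance
def pvWitness_valid_xor : String × Int := ("pop rax; ret", 2)

def Spec_valid_xor (string : String) (xor_value : Int) (out : Bool) : Prop := out = valid_xor_alt string xor_value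
instance (string : String) (xor_value : Int) (out : Bool) : Decidable (Spec_valid_xor string xor_value out) := by unfold Spec_valid_xor; infer_instance

-- ===== CLAIM (what is proved, stated in full; the proofs are below) =====
def Claim_equal_valid_xor : Prop := ∀ (string : String) (xor_value : Int), Dom_valid_xor string xor_value → Pre_valid_xor string xor_value → Spec_valid_xor string xor_value (valid_xor string xor_value)

-- ===== LEMMAS AND PROOFS =====

-- A's four sequential membership scans of the output equal one "no element is a badchar" test.
lemma four_scans_eq_any (l : List Int) :
    (if (120 : Int) ∈ l then false
     else if (103 : Int) ∈ l then false
     else if (97 : Int) ∈ l then false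
     else if (46 : Int) ∈ l then false
     else true)
    = !(l.any fun v => v == 120 || v == 103 || v == 97 || v == 46) := by
  split_ifs with h1 h2 h3 h4 <;> symm <;>
    simp only [Bool.not_eq_false', Bool.not_eq_true', List.any_eq_true, List.any_eq_false,
      Bool.or_eq_true, beq_iff_eq]
  · exact ⟨120, h1, by tauto⟩
  · exact ⟨103, h2, by tauto⟩
  · exact ⟨97, h3, by tauto⟩
  · exact ⟨46, h4, by tauto⟩
  · intro v hv
    rintro (((rfl | rfl) | rfl) | rfl)
    exacts [h1 hv, h2 hv, h3 hv, h4 hv]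

-- B's early-exit loop computes the same "no XORed char is a badchar" test.
lemma go_eq_any (xs : List Char) (x : Int) :
    validXorGo xs x
    = !((xs.map fun c => PySem.Int.bxor (c.toNat : Int) x).any
          fun v => v == 120 || v == 103 || v == 97 || v == 46) := by
  induction xs with
  | nil => rfl
  | cons c rest ih =>
    simp only [validXorGo, List.map_cons, List.any_cons]
    split_ifs with h
    · simp [h]
    · simp only [Bool.or_eq_true, beq_iff_eq, not_or] at h
      simp [ih]
      tauto

theorem valid_xor_eq (string : String) (xor_value : Int) :
    valid_xor string xor_value = valid_xor_alt string xor_value := by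
  unfold valid_xor valid_xor_alt
  rw [PySem.List.foldl_append_singleton_eq_map, four_scans_eq_any, go_eq_any]
  simp

-- ===== VERDICT (by name: the statement is the Claim_ definition above) =====
theorem valid_xor_spec : Claim_equal_valid_xor := by
  intro s x _ _
  exact valid_xor_eq s x
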